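-- pv_equiv track=rewrite | github.com/thumbe12856/competitive-programming | cf/_contest/Edu_110_Div2/Unstable String/solve.py | solve
-- ===== SOURCE A (Python) =====
-- def solve(S):
--     ans = 0
--     N = len(S)
--     left = 0
--     last_c_idx = 0
--     for i in range(N):
--         c = S[i]
--         if S[i] != "?" and S[last_c_idx] != "?":
--             if (i - last_c_idx) & 1:
--                 target = str(1 - int(S[i]))
--             else:
--                 target = S[i]
--
--             if S[last_c_idx] != target:
--                 last_c_idx += 1
--                 left = last_c_idx
--
--         ans += (i - left) + 1
--
--         if c != "?":
--             last_c_idx = i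
--
--     return ans
-- ===== SOURCE B (Python) =====
-- def solve(S):
--     N = len(S)
--     # tokenize: non-'?' chars with a phase signature; '0'/'1' fold into one
--     # class keyed by (bit+index) parity, other chars are their own class keyed
--     # by index parity
--     toks = [(i, (0, (int(c) + i) % 2) if c in '01' else (ord(c), i % 2))
--             for i, c in enumerate(S) if c != '?']
--     # combinatorial count over the token list: a stable substring either
--     # contains no token (triangular numbers over '?'-gaps) or its tokens are a
--     # consecutive equal-signature segment (gap products, accumulated left
--     # choices * right choices)
--     ans = 0
--     prev = -1
--     prevsig = None
--     acc = 0
--     for p, s in toks: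
--         g = p - prev - 1
--         ans += g * (g + 1) // 2
--         ans += acc * (p - prev)
--         acc = acc + (p - prev) if s == prevsig else p - prev
--         prev, prevsig = p, s
--     g = N - prev - 1
--     ans += g * (g + 1) // 2
--     ans += acc * (N - prev)
--     return ans
-- ===== Notes on version B (the rewrite author's own statement) =====
-- stated objective: alternative
-- what changed: Replaces A's per-character sliding-window scan (summing a window length at every index) by a two-stage combinatorial count: first tokenize the non-'?' characters into (position, phase-signature) pairs, then one loop over that token list sums triangular numbers of the '?'-gaps plus gap products over maximal equal-signature token runs.
import Mathlib
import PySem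

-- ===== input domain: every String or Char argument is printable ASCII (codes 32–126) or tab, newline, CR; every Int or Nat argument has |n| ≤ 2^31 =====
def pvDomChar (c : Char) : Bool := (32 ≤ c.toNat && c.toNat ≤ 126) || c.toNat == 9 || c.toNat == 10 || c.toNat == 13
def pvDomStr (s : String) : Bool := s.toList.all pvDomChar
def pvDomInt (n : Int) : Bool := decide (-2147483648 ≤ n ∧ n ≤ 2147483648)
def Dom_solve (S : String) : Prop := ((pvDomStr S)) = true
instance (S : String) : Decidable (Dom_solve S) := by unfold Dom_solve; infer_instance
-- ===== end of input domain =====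

-- B replaces A's per-character sliding-window scan by a staged combinatorial count over the
-- list of (position, phase-signature) tokens: triangular numbers of the '?'-gaps plus gap
-- products over maximal equal-signature token runs (alternative algorithm, same O(n) cost).

-- ===== PORT A =====
-- loop body of A; S[i]/S[last_c_idx] via Str.pyGet? (indices are always in range when used; .getD '?' / .getD 0 are only totality guards:
-- int(S[i]) raising ValueError is exactly what Pre_solve excludes)
def solveStep (S : String) (st : Int × Int × Int) (i : Int) : Int × Int × Int :=
  let ans := st.1
  let left := st.2.1
  let last := st.2.2
  let c := (PySem.Str.pyGet? S i).getD '?'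
  let cl := (PySem.Str.pyGet? S last).getD '?'
  -- if S[i] != "?" and S[last_c_idx] != "?": parity test, target, possible reset
  let p : Int × Int :=
    if c ≠ '?' ∧ cl ≠ '?' then
      let target : String :=
        if PySem.Int.mod (i - last) 2 = 1 then
          PySem.Int.toStr (1 - ((PySem.Int.ofStr? (String.singleton c)).getD 0))
        else String.singleton c
      if String.singleton cl ≠ target then (last + 1, last + 1) else (left, last)
    else (left, last)
  let left := p.1
  let last := p.2
  let ans := ans + (i - left) + 1
  let last := if c ≠ '?' then i else last
  (ans, left, last)

def solve (S : String) : Int :=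
  let N := PySem.Str.len S
  ((PySem.List.pyRange 0 N).foldl (solveStep S) (0, 0, 0)).1

-- ===== PORT B =====
-- phase signature of a non-'?' char ( (0, (int(c)+i) % 2) if c in '01' else (ord(c), i % 2) in Source B )
def sig (c : Char) (i : Int) : Int × Int :=
  if c = '0' ∨ c = '1' then
    (0, PySem.Int.mod (((PySem.Int.ofStr? (String.singleton c)).getD 0) + i) 2)
  else ((c.toNat : Int), PySem.Int.mod i 2)

-- body of Source B's loop over the token list; state (ans, prev, prevsig, acc)
def solveAltStep (st : Int × Int × Option (Int × Int) × Int) (t : Int × Int × Int) :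
    Int × Int × Option (Int × Int) × Int :=
  let ans := st.1
  let prev := st.2.1
  let prevsig := st.2.2.1
  let acc := st.2.2.2
  let p := t.1
  let s := t.2
  let g := p - prev - 1
  let ans := ans + PySem.Int.floordiv (g * (g + 1)) 2
  let ans := ans + acc * (p - prev)
  let acc := if some s = prevsig then acc + (p - prev) else p - prev
  (ans, p, some s, acc)

def solve_alt (S : String) : Int :=
  let N : Int := PySem.Str.len S
  let toks := (PySem.List.enumerate S.toList).filterMap
    (fun pc => if pc.2 ≠ '?' then some (pc.1, sig pc.2 pc.1) else none)
  let st := toks.foldl solveAltStep (0, -1, none, 0)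
  let g := N - st.2.1 - 1
  st.1 + PySem.Int.floordiv (g * (g + 1)) 2 + st.2.2.2 * (N - st.2.1)

-- ===== PRECONDITION & SPEC =====
-- Pre_ excludes exactly the strings on which A raises ValueError: those containing a non-digit,
-- non-'?' character at odd distance from the closest preceding non-'?' character (there A calls
-- int(S[i]) on a non-digit). On every input where A returns normally, Pre_ holds.
def Pre_solve (S : String) : Prop :=
  ∀ i, i < S.toList.length → ∀ j, j < i →
    ¬(S.toList.getD j '?' ≠ '?' ∧
      (∀ k, k < i → j < k → S.toList.getD k '?' = '?') ∧
      S.toList.getD i '?' ≠ '?' ∧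
      (S.toList.getD i '?').isDigit = false ∧
      (i - j) % 2 = 1)
instance (S : String) : Decidable (Pre_solve S) := by unfold Pre_solve; infer_instance
def pvWitness_solve : String := "0?1?10"

def Spec_solve (S : String) (out : Int) : Prop := out = solve_alt S
instance (S : String) (out : Int) : Decidable (Spec_solve S out) := by unfold Spec_solve; infer_instance

-- ===== CLAIM (what is proved, stated in full; the proofs are below) =====
def Claim_equal_solve : Prop := ∀ (S : String), Dom_solve S → Pre_solve S → Spec_solve S (solve S)

-- ===== LEMMAS AND PROOFS =====

-- index of the closest non-'?' char strictly before n, if any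
def prevTok (cs : List Char) : Nat → Option Nat
  | 0 => none
  | n + 1 => if cs.getD n '?' ≠ '?' then some n else prevTok cs n

-- left window bound A maintains after n characters, characterized via signatures
def Break (cs : List Char) : Nat → Int
  | 0 => 0
  | n + 1 =>
    match prevTok cs n with
    | some L =>
        if cs.getD n '?' ≠ '?' ∧ sig (cs.getD n '?') (n : Int) ≠ sig (cs.getD L '?') (L : Int) then
          (L : Int) + 1
        else Break cs n
    | none => Break cs n

-- the common reference value: sum over i < n of (i + 1 - Break (i+1))
def CountN (cs : List Char) : Nat → Int
  | 0 => 0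
  | n + 1 => CountN cs n + ((n : Int) + 1 - Break cs (n + 1))

-- ---- A-side: solve S = CountN S.toList S.toList.length ----

def runA (S : String) : Nat → Int × Int × Int
  | 0 => (0, 0, 0)
  | n + 1 => solveStep S (runA S n) (n : Int)

def InvA (S : String) (n : Nat) (a : Int × Int × Int) : Prop :=
  a.1 = CountN S.toList n ∧ a.2.1 = Break S.toList n ∧
  ((prevTok S.toList n = none ∧ a.2.2 = 0) ∨
   (∃ L, prevTok S.toList n = some L ∧ a.2.2 = (L : Int)))

lemma foldA (S : String) (n : Nat) :
    (List.range n).foldl (fun st (k : Nat) => solveStep S st (k : Int)) (0, 0, 0) = runA S n := by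
  induction n with
  | zero => rfl
  | succ n ih => rw [List.range_succ, List.foldl_append]; simp [runA, ih]

lemma solve_eq_runA (S : String) : solve S = (runA S S.toList.length).1 := by
  simp only [solve, PySem.Str.len_eq, PySem.List.pyRange_zero, List.foldl_map, Int.toNat_natCast]
  rw [foldA]

-- ---- prevTok facts ----

lemma prevTok_none_all (cs : List Char) (n : Nat) (h : prevTok cs n = none) :
    ∀ j, j < n → cs.getD j '?' = '?' := by
  induction n with
  | zero => intro j hj; omega
  | succ n ih =>
      intro j hj
      by_cases hc : cs.getD n '?' ≠ '?'
      · rw [prevTok, if_pos hc] at h; exact absurd h (by simp)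
      · rw [prevTok, if_neg hc] at h
        rcases Nat.lt_succ_iff_lt_or_eq.mp hj with hj | rfl
        · exact ih h j hj
        · exact not_not.mp hc

lemma prevTok_spec (cs : List Char) (n : Nat) (L : Nat) (h : prevTok cs n = some L) :
    L < n ∧ cs.getD L '?' ≠ '?' ∧ ∀ k, L < k → k < n → cs.getD k '?' = '?' := by
  induction n with
  | zero => exact absurd h (by simp [prevTok])
  | succ n ih =>
      by_cases hc : cs.getD n '?' ≠ '?'
      · rw [prevTok, if_pos hc] at h
        obtain rfl : n = L := by exact Option.some.inj h
        exact ⟨by omega, hc, by intro k h1 h2; omega⟩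
      · rw [prevTok, if_neg hc] at h
        obtain ⟨h1, h2, h3⟩ := ih h
        refine ⟨by omega, h2, ?_⟩
        intro k hk1 hk2
        rcases Nat.lt_succ_iff_lt_or_eq.mp hk2 with hk | rfl
        · exact h3 k hk1 hk
        · exact not_not.mp hc

lemma Break_succ_none (cs : List Char) (n : Nat) (hp : prevTok cs n = none) :
    Break cs (n + 1) = Break cs n := by
  rw [Break, hp]

lemma Break_succ_some (cs : List Char) (n : Nat) (L : Nat) (hp : prevTok cs n = some L) :
    Break cs (n + 1) =
      (if cs.getD n '?' ≠ '?' ∧ sig (cs.getD n '?') (n : Int) ≠ sig (cs.getD L '?') (L : Int) then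
        (L : Int) + 1
      else Break cs n) := by
  rw [Break, hp]

-- ---- target-string test ↔ signature test (A's branch vs B's tokenization) ----

lemma modn (m : Nat) : PySem.Int.mod ((m : Int)) 2 = ((m % 2 : Nat) : Int) := by
  unfold PySem.Int.mod
  rw [Int.fmod_eq_emod, if_pos (Or.inl (by norm_num))]
  omega

lemma modsub (i l : Nat) (h : l ≤ i) :
    PySem.Int.mod ((i : Int) - (l : Int)) 2 = (((i - l) % 2 : Nat) : Int) := by
  have he : (i : Int) - (l : Int) = ((i - l : Nat) : Int) := by omega
  rw [he, modn]

lemma char_toNat_inj (a b : Char) (h : a.toNat = b.toNat) : a = b := by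
  have := (Char.ofNat_toNat a).symm.trans (by rw [h, Char.ofNat_toNat])
  exact this

lemma digit_cases (c : Char) (h : c.isDigit = true) :
    c = '0' ∨ c = '1' ∨ c = '2' ∨ c = '3' ∨ c = '4' ∨ c = '5' ∨ c = '6' ∨ c = '7' ∨ c = '8' ∨ c = '9' := by
  have h1 : 48 ≤ c.toNat ∧ c.toNat ≤ 57 := by
    simp [Char.isDigit] at h
    exact ⟨h.1, h.2⟩
  have h2 : c = Char.ofNat c.toNat := (Char.ofNat_toNat c).symm
  obtain ⟨lo, hi⟩ := h1
  interval_cases hx : c.toNat <;> rw [h2] <;> decide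

lemma singleton_inj (a b : Char) : String.singleton a = String.singleton b ↔ a = b := by
  constructor
  · intro h
    have := congrArg String.toList h
    simpa using this
  · intro h; rw [h]

lemma singleton_ne_of_len (a : Char) (s : String) (h2 : s.toList.length ≠ 1) :
    String.singleton a ≠ s := by
  intro h
  apply h2
  have h3 := congrArg String.toList h
  rw [← h3]
  simp

lemma sig_01 (c : Char) (hc : c = '0' ∨ c = '1') (i : Nat) :
    sig c (i : Int) = (0, ((((if c = '1' then 1 else 0) + i) % 2 : Nat) : Int)) := by
  rcases hc with rfl | rfl
  · simp only [sig]
    rw [show (PySem.Int.ofStr? (String.singleton '0')).getD 0 = 0 from by decide]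
    rw [zero_add, modn]
    norm_num
  · simp only [sig]
    rw [show (PySem.Int.ofStr? (String.singleton '1')).getD 0 = 1 from by decide]
    rw [show (1 : Int) + (i : Int) = ((1 + i : Nat) : Int) from by push_cast; ring, modn]
    norm_num

lemma sig_other (c : Char) (hx : ¬(c = '0' ∨ c = '1')) (i : Nat) :
    sig c (i : Int) = ((c.toNat : Int), ((i % 2 : Nat) : Int)) := by
  simp only [sig, if_neg hx, modn]

lemma reset_iff (c cl : Char) (hcd : 9 ≤ c.toNat) (hcld : 9 ≤ cl.toNat)
    (i l : Nat) (hle : l ≤ i)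
    (hdig : (i - l) % 2 = 1 → c.isDigit = true) :
    (String.singleton cl ≠ (if PySem.Int.mod ((i : Int) - (l : Int)) 2 = 1 then
        PySem.Int.toStr (1 - ((PySem.Int.ofStr? (String.singleton c)).getD 0))
      else String.singleton c)) ↔
    ¬ (sig c (i : Int) = sig cl (l : Int)) := by
  rw [modsub i l hle]
  rcases Nat.mod_two_eq_zero_or_one (i - l) with hm | hm
  · -- even gap: the test is plain equality of the two chars
    rw [hm, if_neg (by norm_num : ¬(((0:Nat) : Int) = 1))]
    have hpar : i % 2 = l % 2 := by omega
    rw [Ne, singleton_inj]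
    by_cases h01c : c = '0' ∨ c = '1' <;> by_cases h01cl : cl = '0' ∨ cl = '1'
    · rw [sig_01 c h01c, sig_01 cl h01cl]
      rcases h01c with rfl | rfl <;> rcases h01cl with rfl | rfl <;>
        simp [Prod.ext_iff] <;> omega
    · rw [sig_01 c h01c, sig_other cl h01cl]
      have hne : cl ≠ c := by rcases h01c with rfl | rfl <;> tauto
      constructor
      · intro _ hx
        have h1 := congrArg Prod.fst hx
        simp only at h1
        omega
      · intro _; exact hne
    · rw [sig_other c h01c, sig_01 cl h01cl]
      have hne : cl ≠ c := by rcases h01cl with rfl | rfl <;> tauto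
      constructor
      · intro _ hx
        have h1 := congrArg Prod.fst hx
        simp only at h1
        omega
      · intro _; exact hne
    · rw [sig_other c h01c, sig_other cl h01cl]
      constructor
      · intro hne hx
        have h1 := congrArg Prod.fst hx
        simp only at h1
        exact hne (char_toNat_inj cl c (by omega))
      · intro hne hcc
        apply hne
        rw [hcc]
        simp [Prod.ext_iff]
        omega
  · -- odd gap: c must be a digit
    rw [hm, if_pos (by norm_num : (((1:Nat) : Int) = 1))]
    have hpar : i % 2 ≠ l % 2 := by omega
    have hcdig := hdig hm
    rcases digit_cases c hcdig with rfl | rfl | rfl | rfl | rfl | rfl | rfl | rfl | rfl | rfl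
    · -- c = '0': target is "1"
      rw [show (PySem.Int.toStr (1 - ((PySem.Int.ofStr? (String.singleton '0')).getD 0))) = String.singleton '1' from by decide]
      rw [Ne, singleton_inj]
      by_cases h01cl : cl = '0' ∨ cl = '1'
      · rw [sig_01 '0' (by decide), sig_01 cl h01cl]
        rcases h01cl with rfl | rfl <;> simp [Prod.ext_iff] <;> omega
      · rw [sig_01 '0' (by decide), sig_other cl h01cl]
        constructor
        · intro _ hx
          have h1 := congrArg Prod.fst hx
          simp only at h1
          omega
        · intro _; exact fun hx => h01cl (Or.inr hx)
    · -- c = '1': target is "0"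
      rw [show (PySem.Int.toStr (1 - ((PySem.Int.ofStr? (String.singleton '1')).getD 0))) = String.singleton '0' from by decide]
      rw [Ne, singleton_inj]
      by_cases h01cl : cl = '0' ∨ cl = '1'
      · rw [sig_01 '1' (by decide), sig_01 cl h01cl]
        rcases h01cl with rfl | rfl <;> simp [Prod.ext_iff] <;> omega
      · rw [sig_01 '1' (by decide), sig_other cl h01cl]
        constructor
        · intro _ hx
          have h1 := congrArg Prod.fst hx
          simp only at h1
          omega
        · intro _; exact fun hx => h01cl (Or.inl hx)
    all_goals (
      constructor
      · intro _ hx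
        rw [sig_other _ (by decide)] at hx
        by_cases h01cl : cl = '0' ∨ cl = '1'
        · rw [sig_01 cl h01cl] at hx
          have h1 := congrArg Prod.fst hx
          simp only at h1
          have h9 : 48 ≤ Char.toNat '2' := by decide
          omega
        · rw [sig_other cl h01cl] at hx
          have h2 := congrArg Prod.snd hx
          simp only at h2
          omega
      · intro _
        exact singleton_ne_of_len cl _ (by decide))

lemma dom_char_lb (c : Char) (h : pvDomChar c = true) : 9 ≤ c.toNat := by
  simp only [pvDomChar, Bool.or_eq_true, Bool.and_eq_true, decide_eq_true_eq, beq_iff_eq] at h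
  rcases h with ((⟨h1, _⟩ | h) | h) | h <;> omega

-- ---- A-side invariant induction ----

lemma invA_step (S : String) (hdom : ∀ c ∈ S.toList, pvDomChar c = true)
    (hs : Pre_solve S) (n : Nat) (hn : n < S.toList.length)
    (a : Int × Int × Int) (h : InvA S n a) :
    InvA S (n + 1) (solveStep S a (n : Int)) := by
  obtain ⟨ansA, left, last⟩ := a
  obtain ⟨h1, h2, h3⟩ := h
  simp only at h1 h2 h3
  have hgi : PySem.Str.pyGet? S ((n : Nat) : Int) = some (S.toList.getD n '?') := by
    rw [PySem.Str.pyGet?_natCast, List.getElem?_eq_getElem hn, List.getD_eq_getElem S.toList '?' hn]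
  by_cases hq : S.toList.getD n '?' = '?'
  · -- current char is '?': A's branch is skipped, Break and prevTok are unchanged
    have hbr : Break S.toList (n + 1) = Break S.toList n := by
      cases hp : prevTok S.toList n with
      | none => exact Break_succ_none _ _ hp
      | some L => rw [Break_succ_some _ _ _ hp, if_neg (fun hx => hx.1 hq)]
    have hpt : prevTok S.toList (n + 1) = prevTok S.toList n := by
      rw [prevTok, if_neg (not_not_intro hq)]
    simp only [solveStep, hgi, Option.getD_some]
    rw [if_neg (fun hx => hx.1 hq), if_neg (not_not_intro hq)]
    refine ⟨?_, ?_, ?_⟩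
    · simp only [CountN, hbr, h1, h2]; ring
    · simp only [hbr, h2]
    · rcases h3 with ⟨hpn, hl0⟩ | ⟨L, hpL, hlL⟩
      · exact Or.inl ⟨by rw [hpt]; exact hpn, by simp only [hl0]⟩
      · exact Or.inr ⟨L, by rw [hpt]; exact hpL, by simp only [hlL]⟩
  · -- current char is a token
    have hpt : prevTok S.toList (n + 1) = some n := by
      rw [prevTok, if_pos hq]
    have hdomc : ∀ j, j < S.toList.length → 9 ≤ (S.toList.getD j '?').toNat := by
      intro j hj
      apply dom_char_lb
      apply hdom
      rw [List.getD_eq_getElem S.toList '?' hj]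
      exact List.getElem_mem hj
    rcases h3 with ⟨hpn, hl0⟩ | ⟨L, hpL, hlL⟩
    · -- no token before n
      have hbr : Break S.toList (n + 1) = Break S.toList n := Break_succ_none _ _ hpn
      have hgl : PySem.Str.pyGet? S last = some (S.toList.getD 0 '?') := by
        rw [hl0, show (0 : Int) = ((0 : Nat) : Int) from rfl, PySem.Str.pyGet?_natCast,
          List.getElem?_eq_getElem (by omega), List.getD_eq_getElem S.toList '?' (by omega)]
      simp only [solveStep, hgi, hgl, Option.getD_some]
      by_cases hn0 : n = 0
      · -- first char: A compares S[0] with itself, no reset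
        subst hn0
        rw [if_pos ⟨hq, hq⟩, hl0]
        rw [show PySem.Int.mod (((0 : Nat) : Int) - 0) 2 = ((0 : Nat) : Int) from by
          rw [show (((0 : Nat) : Int) - 0) = ((0 : Nat) : Int) from by omega, modn]]
        rw [if_neg (by norm_num : ¬(((0 : Nat) : Int) = 1))]
        rw [if_neg (not_not_intro rfl)]
        rw [if_pos hq]
        refine ⟨?_, ?_, Or.inr ⟨0, hpt, by simp only⟩⟩
        · simp only [CountN, hbr, h1, h2]; ring
        · simp only [hbr, h2]
      · -- all earlier chars are '?': S[last_c_idx] is '?', branch skipped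
        have hcl : S.toList.getD 0 '?' = '?' := prevTok_none_all S.toList n hpn 0 (by omega)
        rw [if_neg (fun hx => hx.2 hcl), if_pos hq]
        refine ⟨?_, ?_, Or.inr ⟨n, hpt, by simp only⟩⟩
        · simp only [CountN, hbr, h1, h2]; ring
        · simp only [hbr, h2]
    · -- closest token before n is at L
      obtain ⟨hLn, hLtok, hLafter⟩ := prevTok_spec S.toList n L hpL
      have hgl : PySem.Str.pyGet? S last = some (S.toList.getD L '?') := by
        rw [hlL, PySem.Str.pyGet?_natCast, List.getElem?_eq_getElem (by omega),
          List.getD_eq_getElem S.toList '?' (by omega)]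
      have hdig : (n - L) % 2 = 1 → (S.toList.getD n '?').isDigit = true := by
        intro hodd
        by_contra hnd
        refine hs n hn L (by omega) ⟨hLtok, ?_, hq, ?_, hodd⟩
        · intro k hk1 hk2; exact hLafter k hk2 hk1
        · simpa using hnd
      have htar := reset_iff (S.toList.getD n '?') (S.toList.getD L '?')
        (hdomc n hn) (hdomc L (by omega)) n L (by omega) hdig
      have hbr : Break S.toList (n + 1) =
          if sig (S.toList.getD n '?') (n : Int) ≠ sig (S.toList.getD L '?') (L : Int) then
            (L : Int) + 1
          else Break S.toList n := by
        rw [Break_succ_some _ _ _ hpL]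
        by_cases hsig : sig (S.toList.getD n '?') (n : Int) ≠ sig (S.toList.getD L '?') (L : Int)
        · rw [if_pos ⟨hq, hsig⟩, if_pos hsig]
        · rw [if_neg (fun hx => hsig hx.2), if_neg hsig]
      simp only [solveStep, hgi, hgl, Option.getD_some]
      rw [if_pos ⟨hq, hLtok⟩, hlL]
      by_cases hsig : sig (S.toList.getD n '?') (n : Int) = sig (S.toList.getD L '?') (L : Int)
      · -- same signature: no reset
        rw [if_neg (fun hx => htar.mp hx hsig), if_pos hq]
        refine ⟨?_, ?_, Or.inr ⟨n, hpt, by simp only⟩⟩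
        · simp only [CountN, hbr, if_neg (not_not_intro hsig), h1, h2]; ring
        · simp only [hbr, if_neg (not_not_intro hsig), h2]
      · -- different signature: A resets left to L + 1
        rw [if_pos (htar.mpr hsig), if_pos hq]
        refine ⟨?_, ?_, Or.inr ⟨n, hpt, by simp only⟩⟩
        · simp only [CountN, hbr, if_pos hsig, h1]; ring
        · simp only [hbr, if_pos hsig]

lemma invA_all (S : String) (hdom : ∀ c ∈ S.toList, pvDomChar c = true) (hs : Pre_solve S) :
    ∀ n, n ≤ S.toList.length → InvA S n (runA S n) := by
  intro n
  induction n with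
  | zero => intro _; exact ⟨rfl, rfl, Or.inl ⟨rfl, rfl⟩⟩
  | succ n ih =>
      intro hle
      exact invA_step S hdom hs n (by omega) _ (ih (by omega))

-- ---- B-side: solve_alt S = CountN S.toList S.toList.length ----

def toksOf (cs : List Char) : List (Int × Int × Int) :=
  (PySem.List.enumerate cs).filterMap
    (fun pc => if pc.2 ≠ '?' then some (pc.1, sig pc.2 pc.1) else none)

def stB (cs : List Char) : Int × Int × Option (Int × Int) × Int :=
  (toksOf cs).foldl solveAltStep (0, -1, none, 0)

-- finalization of Source B after its loop, as a function of the state and N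
def finB (st : Int × Int × Option (Int × Int) × Int) (n : Int) : Int :=
  st.1 + PySem.Int.floordiv ((n - st.2.1 - 1) * ((n - st.2.1 - 1) + 1)) 2 + st.2.2.2 * (n - st.2.1)

def InvB (cs : List Char) : Prop :=
  finB (stB cs) (cs.length : Int) = CountN cs cs.length ∧
  ((prevTok cs cs.length = none ∧ (stB cs).2.1 = -1 ∧ (stB cs).2.2.1 = none ∧
      (stB cs).2.2.2 = 0 ∧ Break cs cs.length = 0) ∨
   (∃ L, prevTok cs cs.length = some L ∧ (stB cs).2.1 = (L : Int) ∧
      (stB cs).2.2.1 = some (sig (cs.getD L '?') (L : Int)) ∧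
      (stB cs).2.2.2 = (L : Int) + 1 - Break cs cs.length))

lemma solve_alt_eq_finB (S : String) : solve_alt S = finB (stB S.toList) (S.toList.length : Int) := by
  simp only [solve_alt, finB, stB, toksOf, PySem.Str.len_eq]

lemma tri_succ (g : Int) :
    PySem.Int.floordiv ((g + 1) * ((g + 1) + 1)) 2 = PySem.Int.floordiv (g * (g + 1)) 2 + (g + 1) := by
  obtain ⟨k, hk⟩ := Int.even_mul_succ_self g
  have h2 : (g + 1) * ((g + 1) + 1) = (k + (g + 1)) + (k + (g + 1)) := by linear_combination hk
  rw [hk, h2, PySem.Int.floordiv_eq_ediv_of_pos (by norm_num), PySem.Int.floordiv_eq_ediv_of_pos (by norm_num)]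
  omega

-- stability of the prefix functions under appending a character
lemma getD_append_lt (cs : List Char) (c : Char) (j : Nat) (h : j < cs.length) :
    (cs ++ [c]).getD j '?' = cs.getD j '?' := by
  rw [List.getD_eq_getElem?_getD, List.getD_eq_getElem?_getD, List.getElem?_append_left h]

lemma getD_append_self (cs : List Char) (c : Char) :
    (cs ++ [c]).getD cs.length '?' = c := by
  rw [List.getD_eq_getElem?_getD]
  simp

lemma prevTok_append (cs : List Char) (c : Char) (m : Nat) (h : m ≤ cs.length) :
    prevTok (cs ++ [c]) m = prevTok cs m := by
  induction m with
  | zero => rfl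
  | succ m ih =>
      rw [prevTok, prevTok, getD_append_lt cs c m (by omega), ih (by omega)]

lemma Break_append (cs : List Char) (c : Char) (m : Nat) (h : m ≤ cs.length) :
    Break (cs ++ [c]) m = Break cs m := by
  induction m with
  | zero => rfl
  | succ m ih =>
      rw [Break, Break, prevTok_append cs c m (by omega), ih (by omega),
        getD_append_lt cs c m (by omega)]
      cases hp : prevTok cs m with
      | none => rfl
      | some L =>
          have hL := (prevTok_spec cs m L hp).1
          simp only [getD_append_lt cs c L (by omega)]

lemma CountN_append (cs : List Char) (c : Char) (m : Nat) (h : m ≤ cs.length) :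
    CountN (cs ++ [c]) m = CountN cs m := by
  induction m with
  | zero => rfl
  | succ m ih => rw [CountN, CountN, ih (by omega), Break_append cs c (m + 1) (by omega)]

lemma toksOf_append (cs : List Char) (c : Char) :
    toksOf (cs ++ [c]) =
      toksOf cs ++ (if c ≠ '?' then [((cs.length : Int), sig c (cs.length : Int))] else []) := by
  unfold toksOf
  rw [PySem.List.enumerate_append, List.filterMap_append,
    PySem.List.enumerate_cons, PySem.List.enumerate_nil]
  simp only [List.filterMap_cons, List.filterMap_nil, zero_add]
  by_cases hc : c ≠ '?'
  · rw [if_pos hc, if_pos hc]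
  · rw [if_neg hc, if_neg hc]

lemma invB_step (cs : List Char) (c : Char) (h : InvB cs) : InvB (cs ++ [c]) := by
  obtain ⟨hfin, hcase⟩ := h
  have hlen : (cs ++ [c]).length = cs.length + 1 := by simp
  by_cases hc : c ≠ '?'
  · -- appending a token at position cs.length
    have hstb : stB (cs ++ [c]) =
        solveAltStep (stB cs) ((cs.length : Int), sig c (cs.length : Int)) := by
      unfold stB
      rw [toksOf_append, if_pos hc, List.foldl_append]
      rfl
    have hpt : prevTok (cs ++ [c]) (cs.length + 1) = some cs.length := by
      rw [prevTok, getD_append_self, if_pos hc]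
    have hp' : prevTok (cs ++ [c]) cs.length = prevTok cs cs.length :=
      prevTok_append _ _ _ (le_refl _)
    have hcnt : CountN (cs ++ [c]) (cs.length + 1) =
        CountN cs cs.length + ((cs.length : Int) + 1 - Break (cs ++ [c]) (cs.length + 1)) := by
      rw [CountN, CountN_append _ _ _ (le_refl _)]
    -- acc' = cs.length + 1 - Break', and the new state's fixed components
    rcases hcase with ⟨hptn, hprev, hps, hacc, hbr0⟩ | ⟨L, hptL, hprev, hps, hacc⟩
    · -- no token yet: prevsig = none, acc' = len + 1, Break' = 0
      have hbr' : Break (cs ++ [c]) (cs.length + 1) = 0 := by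
        rw [Break_succ_none _ _ (hp'.trans hptn), Break_append _ _ _ (le_refl _), hbr0]
      have hst' : stB (cs ++ [c]) =
          ((stB cs).1 + PySem.Int.floordiv (((cs.length : Int) - (-1) - 1) * (((cs.length : Int) - (-1) - 1) + 1)) 2
              + (stB cs).2.2.2 * ((cs.length : Int) - (-1)),
            (cs.length : Int), some (sig c (cs.length : Int)), (cs.length : Int) - (-1)) := by
        rw [hstb]
        simp [solveAltStep, hprev, hps]
      constructor
      · rw [hlen, hcnt, hbr', hst', ← hfin]
        simp only [finB, hprev, hacc]
        push_cast
        have e0 : (cs.length : Int) + 1 - (cs.length : Int) - 1 = 0 := by ring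
        rw [e0]
        rw [show PySem.Int.floordiv (0 * (0 + 1)) 2 = 0 from by decide]
        ring
      · refine Or.inr ⟨cs.length, by rw [hlen]; exact hpt, ?_, ?_, ?_⟩
        · rw [hst']
        · rw [hst', getD_append_self]
        · rw [hst', hlen, hbr']
          push_cast
          ring
    · -- last token at L
      obtain ⟨hLlt, hLtok, _⟩ := prevTok_spec cs _ L hptL
      by_cases hsig : sig c (cs.length : Int) = sig (cs.getD L '?') (L : Int)
      · -- same signature: acc extends, Break unchanged
        have hbr' : Break (cs ++ [c]) (cs.length + 1) = Break cs cs.length := by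
          rw [Break_succ_some _ _ _ (hp'.trans hptL), getD_append_self,
            getD_append_lt cs c L (by omega), Break_append _ _ _ (le_refl _),
            if_neg (fun hx => hx.2 hsig)]
        have hst' : stB (cs ++ [c]) =
            ((stB cs).1 + PySem.Int.floordiv (((cs.length : Int) - L - 1) * (((cs.length : Int) - L - 1) + 1)) 2
                + (stB cs).2.2.2 * ((cs.length : Int) - L),
              (cs.length : Int), some (sig c (cs.length : Int)),
              (stB cs).2.2.2 + ((cs.length : Int) - L)) := by
          rw [hstb]
          simp [solveAltStep, hprev, hps, hsig]
        constructor
        · rw [hlen, hcnt, hbr', hst', ← hfin]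
          simp only [finB, hprev, hacc]
          push_cast
          have e0 : (cs.length : Int) + 1 - (cs.length : Int) - 1 = 0 := by ring
          rw [e0]
          rw [show PySem.Int.floordiv (0 * (0 + 1)) 2 = 0 from by decide]
          ring
        · refine Or.inr ⟨cs.length, by rw [hlen]; exact hpt, ?_, ?_, ?_⟩
          · rw [hst']
          · rw [hst', getD_append_self]
          · rw [hst', hlen, hbr', hacc]
            push_cast
            ring
      · -- different signature: acc restarts, Break' = L + 1
        have hbr' : Break (cs ++ [c]) (cs.length + 1) = (L : Int) + 1 := by
          rw [Break_succ_some _ _ _ (hp'.trans hptL), getD_append_self,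
            getD_append_lt cs c L (by omega), if_pos ⟨hc, hsig⟩]
        have hst' : stB (cs ++ [c]) =
            ((stB cs).1 + PySem.Int.floordiv (((cs.length : Int) - L - 1) * (((cs.length : Int) - L - 1) + 1)) 2
                + (stB cs).2.2.2 * ((cs.length : Int) - L),
              (cs.length : Int), some (sig c (cs.length : Int)), (cs.length : Int) - L) := by
          rw [hstb]
          simp only [solveAltStep, hps, hprev]
          rw [if_neg (fun hx => hsig (Option.some.inj hx))]
        constructor
        · rw [hlen, hcnt, hbr', hst', ← hfin]
          simp only [finB, hprev, hacc]
          push_cast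
          have e0 : (cs.length : Int) + 1 - (cs.length : Int) - 1 = 0 := by ring
          rw [e0]
          rw [show PySem.Int.floordiv (0 * (0 + 1)) 2 = 0 from by decide]
          ring
        · refine Or.inr ⟨cs.length, by rw [hlen]; exact hpt, ?_, ?_, ?_⟩
          · rw [hst']
          · rw [hst', getD_append_self]
          · rw [hst', hlen, hbr']
            push_cast
            ring
  · -- appending '?': the token list and state are unchanged
    have hceq : c = '?' := not_not.mp hc
    have hstb : stB (cs ++ [c]) = stB cs := by
      unfold stB
      rw [toksOf_append, if_neg hc, List.append_nil]
    have hpt : prevTok (cs ++ [c]) (cs.length + 1) = prevTok cs cs.length := by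
      rw [prevTok, getD_append_self, if_neg (by simp [hceq]), prevTok_append _ _ _ (le_refl _)]
    have hp' : prevTok (cs ++ [c]) cs.length = prevTok cs cs.length :=
      prevTok_append _ _ _ (le_refl _)
    have hbr : Break (cs ++ [c]) (cs.length + 1) = Break cs cs.length := by
      cases hp : prevTok cs cs.length with
      | none => rw [Break_succ_none _ _ (hp'.trans hp), Break_append _ _ _ (le_refl _)]
      | some L =>
          have hL := (prevTok_spec cs _ L hp).1
          rw [Break_succ_some _ _ _ (hp'.trans hp), getD_append_self,
            if_neg (fun hx => hx.1 hceq), Break_append _ _ _ (le_refl _)]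
    have hcnt : CountN (cs ++ [c]) (cs.length + 1) =
        CountN cs cs.length + ((cs.length : Int) + 1 - Break cs cs.length) := by
      rw [CountN, CountN_append _ _ _ (le_refl _), hbr]
    constructor
    · rw [hlen, hstb, hcnt, ← hfin]
      rcases hcase with ⟨_, hprev, _, hacc, hbr0⟩ | ⟨L, _, hprev, _, hacc⟩
      · simp only [finB, hprev, hacc, hbr0]
        push_cast
        have e1 : (cs.length : Int) + 1 - (-1) - 1 = ((cs.length : Int) - (-1) - 1) + 1 := by ring
        rw [e1, tri_succ]
        ring
      · simp only [finB, hprev, hacc]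
        push_cast
        have e1 : (cs.length : Int) + 1 - L - 1 = ((cs.length : Int) - L - 1) + 1 := by ring
        rw [e1, tri_succ]
        ring
    · rcases hcase with ⟨hptn, hprev, hps, hacc, hbr0⟩ | ⟨L, hptL, hprev, hps, hacc⟩
      · exact Or.inl ⟨by rw [hlen, hpt]; exact hptn, by rw [hstb]; exact hprev,
          by rw [hstb]; exact hps, by rw [hstb]; exact hacc, by rw [hlen, hbr]; exact hbr0⟩
      · have hLlt := (prevTok_spec cs _ L hptL).1
        refine Or.inr ⟨L, by rw [hlen, hpt]; exact hptL, by rw [hstb]; exact hprev, ?_,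
          by rw [hstb, hlen, hbr]; exact hacc⟩
        rw [hstb, getD_append_lt cs c L (by omega)]
        exact hps

lemma invB_all (cs : List Char) : InvB cs := by
  induction cs using List.reverseRecOn with
  | nil =>
      constructor
      · decide
      · exact Or.inl ⟨rfl, rfl, rfl, rfl, rfl⟩
  | append_singleton cs c ih => exact invB_step cs c ih

-- ===== VERDICT (by name: the statement is the Claim_ definition above) =====
theorem solve_spec : Claim_equal_solve := by
  intro S hdom hpre
  have hdom' : ∀ c ∈ S.toList, pvDomChar c = true := by
    intro c hc
    exact List.all_eq_true.mp hdom c hc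
  unfold Spec_solve
  rw [solve_eq_runA, solve_alt_eq_finB, (invB_all S.toList).1]
  exact (invA_all S hdom' hpre S.toList.length (le_refl _)).1
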